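-- pv_equiv track=rewrite | github.com/janelia-flyem/DVIDSparkServices | DVIDSparkServices/util.py | boxlist_to_json
-- ===== SOURCE A (Python) =====
-- def boxlist_to_json( bounds_list, indent=0 ):
--     # The 'json' module doesn't have nice pretty-printing options for our purposes,
--     # so we'll do this ourselves.
--     from io import StringIO
--
--     buf = StringIO()
--     buf.write('    [\n')
--
--     bounds_list, last_item = bounds_list[:-1], bounds_list[-1:]
--
--     for bounds_zyx in bounds_list:
--         start_str = '[{}, {}, {}]'.format(*bounds_zyx[0])
--         stop_str  = '[{}, {}, {}]'.format(*bounds_zyx[1])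
--         buf.write(' '*indent + '[ ' + start_str + ', ' + stop_str + ' ],\n')
--
--     # Write last entry
--     if last_item:
--         last_item = last_item[0]
--         start_str = '[{}, {}, {}]'.format(*last_item[0])
--         stop_str  = '[{}, {}, {}]'.format(*last_item[1])
--         buf.write(' '*indent + '[ ' + start_str + ', ' + stop_str + ' ]')
--
--     buf.write('\n')
--     buf.write(' '*indent + ']')
--
--     return str(buf.getvalue())
-- ===== SOURCE B (Python) =====
-- def boxlist_to_json(bounds_list, indent=0):
--     pad = ' ' * indent
--     entries = [f"{pad}[ [{b[0][0]}, {b[0][1]}, {b[0][2]}], [{b[1][0]}, {b[1][1]}, {b[1][2]}] ]"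
--                for b in bounds_list]
--     return '    [\n' + ',\n'.join(entries) + '\n' + pad + ']'
-- ===== Notes on version B (the rewrite author's own statement) =====
-- stated objective: simpler
-- what changed: B drops A's StringIO streaming and explicit init/last split-with-trailing-comma branch: it maps each box to one fully formatted entry string and joins them with ', ', wrapping once.
import Mathlib
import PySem

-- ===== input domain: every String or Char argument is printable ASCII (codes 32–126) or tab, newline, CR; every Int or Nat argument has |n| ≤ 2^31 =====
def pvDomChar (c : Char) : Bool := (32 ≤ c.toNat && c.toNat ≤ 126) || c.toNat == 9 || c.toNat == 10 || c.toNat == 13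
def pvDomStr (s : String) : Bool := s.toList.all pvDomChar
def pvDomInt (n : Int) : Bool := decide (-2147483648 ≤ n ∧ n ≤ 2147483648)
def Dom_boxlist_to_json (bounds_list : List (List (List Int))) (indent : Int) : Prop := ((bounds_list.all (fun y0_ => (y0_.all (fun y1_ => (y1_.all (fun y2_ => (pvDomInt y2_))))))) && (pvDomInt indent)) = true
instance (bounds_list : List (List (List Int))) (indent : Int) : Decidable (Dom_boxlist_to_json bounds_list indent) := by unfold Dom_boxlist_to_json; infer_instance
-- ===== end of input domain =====

-- B replaces A's StringIO streaming with a last-element branch by a list of per-box entry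
-- strings joined with ',\n' (separator join instead of trailing-comma bookkeeping); objective: simpler.

-- ===== PORT A =====
-- ' ' * indent  (Python string repetition: empty for indent ≤ 0)
def pvIndentA (indent : Int) : String := String.ofList (List.replicate indent.toNat ' ')

-- '[{}, {}, {}]'.format(*xs); Pre_ guarantees xs has at least 3 entries (Python raises otherwise)
def pvFmtTripleA (xs : List Int) : String :=
  "[" ++ PySem.Int.toStr (PySem.List.pyGetD xs 0 0) ++ ", " ++ PySem.Int.toStr (PySem.List.pyGetD xs 1 0)
      ++ ", " ++ PySem.Int.toStr (PySem.List.pyGetD xs 2 0) ++ "]"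

def boxlist_to_json (bounds_list : List (List (List Int))) (indent : Int) : String :=
  let buf : String := "    [\n"
  -- bounds_list, last_item = bounds_list[:-1], bounds_list[-1:]
  let init := PySem.List.slice bounds_list none (some (-1))
  let last_item := PySem.List.slice bounds_list (some (-1)) none
  let buf := init.foldl (fun buf bounds_zyx =>
      let start_str := pvFmtTripleA (PySem.List.pyGetD bounds_zyx 0 [])
      let stop_str  := pvFmtTripleA (PySem.List.pyGetD bounds_zyx 1 [])
      buf ++ pvIndentA indent ++ "[ " ++ start_str ++ ", " ++ stop_str ++ " ],\n") buf
  let buf := match last_item with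
    | [] => buf
    | li :: _ =>
      let start_str := pvFmtTripleA (PySem.List.pyGetD li 0 [])
      let stop_str  := pvFmtTripleA (PySem.List.pyGetD li 1 [])
      buf ++ pvIndentA indent ++ "[ " ++ start_str ++ ", " ++ stop_str ++ " ]"
  buf ++ "\n" ++ pvIndentA indent ++ "]"

-- ===== PORT B =====
-- one fully formatted per-box string (the f-string of Source B)
def pvEntryB (pad : String) (b : List (List Int)) : String :=
  pad ++ "[ [" ++ PySem.Int.toStr (PySem.List.pyGetD (PySem.List.pyGetD b 0 []) 0 0)
      ++ ", " ++ PySem.Int.toStr (PySem.List.pyGetD (PySem.List.pyGetD b 0 []) 1 0)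
      ++ ", " ++ PySem.Int.toStr (PySem.List.pyGetD (PySem.List.pyGetD b 0 []) 2 0)
      ++ "], [" ++ PySem.Int.toStr (PySem.List.pyGetD (PySem.List.pyGetD b 1 []) 0 0)
      ++ ", " ++ PySem.Int.toStr (PySem.List.pyGetD (PySem.List.pyGetD b 1 []) 1 0)
      ++ ", " ++ PySem.Int.toStr (PySem.List.pyGetD (PySem.List.pyGetD b 1 []) 2 0)
      ++ "] ]"

def boxlist_to_json_alt (bounds_list : List (List (List Int))) (indent : Int) : String :=
  let pad : String := String.ofList (List.replicate indent.toNat ' ')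
  let entries := bounds_list.map (pvEntryB pad)
  "    [\n" ++ PySem.Str.join ",\n" entries ++ "\n" ++ pad ++ "]"

-- ===== PRECONDITION & SPEC =====
-- Pre_ excludes exactly the inputs where Python A raises (IndexError on a box with fewer than
-- two coordinate lists, or a format IndexError when a coordinate list has fewer than 3 entries).
def Pre_boxlist_to_json (bounds_list : List (List (List Int))) (indent : Int) : Prop :=
  ∀ b ∈ bounds_list, 2 ≤ b.length ∧ 3 ≤ (b.getD 0 []).length ∧ 3 ≤ (b.getD 1 []).length

instance (bounds_list : List (List (List Int))) (indent : Int) : Decidable (Pre_boxlist_to_json bounds_list indent) := by unfold Pre_boxlist_to_json; infer_instance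

def pvWitness_boxlist_to_json : List (List (List Int)) × Int := ([[[0, 0, 0], [1, 2, 3]], [[4, 5, 6], [7, 8, 9]]], 2)

def Spec_boxlist_to_json (bounds_list : List (List (List Int))) (indent : Int) (out : String) : Prop := out = boxlist_to_json_alt bounds_list indent
instance (bounds_list : List (List (List Int))) (indent : Int) (out : String) : Decidable (Spec_boxlist_to_json bounds_list indent out) := by unfold Spec_boxlist_to_json; infer_instance

-- ===== CLAIM (what is proved, stated in full; the proofs are below) =====
def Claim_equal_boxlist_to_json : Prop := ∀ (bounds_list : List (List (List Int))) (indent : Int), Dom_boxlist_to_json bounds_list indent → Pre_boxlist_to_json bounds_list indent → Spec_boxlist_to_json bounds_list indent (boxlist_to_json bounds_list indent)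

-- ===== LEMMAS AND PROOFS =====

theorem strJoin_nil (sep : String) : PySem.Str.join sep [] = "" := rfl

theorem strJoin_singleton (sep a : String) : PySem.Str.join sep [a] = a := by
  apply String.toList_inj.mp
  simp [PySem.Str.join, PySem.Chars.join_singleton]

theorem strJoin_cons_cons (sep a b : String) (l : List String) :
    PySem.Str.join sep (a :: b :: l) = a ++ (sep ++ PySem.Str.join sep (b :: l)) := by
  apply String.toList_inj.mp
  simp [PySem.Str.join, PySem.Chars.join_cons_cons]

-- A's per-box last line (prefix s, suffix t) is B's entry string
theorem lineA_eq' (s t pad : String) (b : List (List Int)) :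
    s ++ (pad ++ ("[ " ++ (pvFmtTripleA (PySem.List.pyGetD b 0 []) ++ (", "
      ++ (pvFmtTripleA (PySem.List.pyGetD b 1 []) ++ (" ]" ++ t))))))
    = (s ++ pvEntryB pad b) ++ t := by
  apply String.toList_inj.mp
  simp [pvEntryB, pvFmtTripleA, String.toList_append]

-- A's loop body, as a function, appends B's entry followed by ',\n'
theorem stepA_eq (pad : String) :
    (fun (buf : String) (bounds_zyx : List (List Int)) =>
        buf ++ (pad ++ ("[ " ++ (pvFmtTripleA (PySem.List.pyGetD bounds_zyx 0 []) ++ (", "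
            ++ (pvFmtTripleA (PySem.List.pyGetD bounds_zyx 1 []) ++ " ],\n"))))))
    = (fun buf b => buf ++ (pvEntryB pad b ++ ",\n")) := by
  funext buf b
  apply String.toList_inj.mp
  simp [pvEntryB, pvFmtTripleA, String.toList_append]

theorem drop_length_cons {α : Type} (l : List α) (x : α) :
    (x :: l).drop l.length = [l.getLastD x] := by
  induction l generalizing x with
  | nil => rfl
  | cons y ys ih => rw [List.length_cons, List.drop_succ_cons, List.getLastD_cons]; exact ih y

-- fold over the init with ',\n' after every entry, then the last entry = separator join of all entries
theorem foldl_comma_last (e : List (List Int) → String) :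
    ∀ (l : List (List (List Int))) (x : List (List Int)) (s : String),
      ((x :: l).dropLast.foldl (fun acc b => acc ++ (e b ++ ",\n")) s) ++ e (l.getLastD x)
      = s ++ PySem.Str.join ",\n" ((x :: l).map e)
  | [], x, s => by simp [strJoin_singleton]
  | y :: ys, x, s => by
    have ih := foldl_comma_last e ys y (s ++ (e x ++ ",\n"))
    simp only [List.dropLast_cons₂, List.foldl_cons, List.getLastD_cons] at *
    rw [ih]
    simp only [List.map_cons]
    rw [strJoin_cons_cons]
    simp [String.append_assoc]

-- ===== VERDICT (by name: the statement is the Claim_ definition above) =====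
theorem boxlist_to_json_spec : Claim_equal_boxlist_to_json := by
  intro bounds_list indent _dom _pre
  unfold Spec_boxlist_to_json boxlist_to_json boxlist_to_json_alt
  cases bounds_list with
  | nil =>
    simp [PySem.List.slice_to_neg_one, PySem.List.slice_from_neg_one, strJoin_nil,
      pvIndentA, String.append_assoc]
  | cons x l =>
    rw [PySem.List.slice_to_neg_one, PySem.List.slice_from_neg_one]
    simp only [List.length_cons, Nat.add_sub_cancel]
    rw [drop_length_cons l x]
    simp only [pvIndentA, String.append_assoc]
    rw [stepA_eq (String.ofList (List.replicate indent.toNat ' '))]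
    rw [lineA_eq']
    rw [foldl_comma_last (pvEntryB (String.ofList (List.replicate indent.toNat ' '))) l x "    [\n"]
    simp [String.append_assoc]
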